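-- pv_equiv track=rewrite | github.com/banteg/adventofcode-2018 | day13.py | recover_tracks
-- ===== SOURCE A (Python) =====
-- def recover_tracks(data):
--     tracks = {
--         '>': '-',
--         '<': '-',
--         '^': '|',
--         'v': '|',
--     }
--     for car in tracks:
--         data = data.replace(car, tracks[car])
--     return data.splitlines()
-- ===== SOURCE B (Python) =====
-- def recover_tracks(data):
--     mapping = {'>': '-', '<': '-', '^': '|', 'v': '|'}
--     return ''.join(mapping.get(c, c) for c in data).splitlines()
-- ===== Notes on version B (the rewrite author's own statement) =====
-- stated objective: alternative
-- what changed: Replaces four sequential full-string str.replace passes by a single pass that maps each character through a cart->track dict and joins the result before splitlines; asymptotically one pass instead of four, though CPython's C-level replace is faster in practice.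
import Mathlib
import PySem

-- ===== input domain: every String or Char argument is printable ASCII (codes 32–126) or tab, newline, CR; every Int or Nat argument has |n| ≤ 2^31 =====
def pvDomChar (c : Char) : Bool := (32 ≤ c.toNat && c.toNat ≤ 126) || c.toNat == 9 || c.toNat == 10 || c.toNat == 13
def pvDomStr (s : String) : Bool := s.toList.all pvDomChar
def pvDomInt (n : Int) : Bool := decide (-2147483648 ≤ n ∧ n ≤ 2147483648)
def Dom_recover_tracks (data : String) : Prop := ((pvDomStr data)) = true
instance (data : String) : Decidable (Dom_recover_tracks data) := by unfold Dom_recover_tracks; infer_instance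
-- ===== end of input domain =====

-- B replaces A's four sequential full-string replace passes by one single map over the characters via a cart->track dict (alternative single-pass formulation); return value proved equal.


-- ===== PORT A =====
-- the dict 'tracks'; the for-loop over its keys is unrolled in insertion order, as Python iterates it
def recover_tracks (data : String) : List String :=
  let data := PySem.Str.replace data ">" "-"
  let data := PySem.Str.replace data "<" "-"
  let data := PySem.Str.replace data "^" "|"
  let data := PySem.Str.replace data "v" "|"
  PySem.Str.splitlines data

-- ===== PORT B =====
def trackMapping : PySem.Dict Char Char :=
  PySem.Dict.mk [('>', '-'), ('<', '-'), ('^', '|'), ('v', '|')]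

def recover_tracks_alt (data : String) : List String :=
  PySem.Str.splitlines (String.ofList (data.toList.map (fun c => trackMapping.getD c c)))

-- ===== PRECONDITION & SPEC =====
def Spec_recover_tracks (data : String) (out : List String) : Prop := out = recover_tracks_alt data
instance (data : String) (out : List String) : Decidable (Spec_recover_tracks data out) := by unfold Spec_recover_tracks; infer_instance

-- ===== CLAIM (what is proved, stated in full; the proofs are below) =====
def Claim_equal_recover_tracks : Prop := ∀ (data : String), Dom_recover_tracks data → Spec_recover_tracks data (recover_tracks data)

-- ===== LEMMAS AND PROOFS =====

-- single-character replace is a pointwise map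
theorem replace_go_single (a b : Char) : ∀ (fuel : Nat) (l acc : List Char), l.length ≤ fuel →
    PySem.Chars.replace.go [a] [b] fuel l acc = acc.reverse ++ l.map (fun c => if c = a then b else c) := by
  intro fuel
  induction fuel with
  | zero =>
    intro l acc h
    have : l = [] := List.eq_nil_of_length_eq_zero (Nat.le_zero.mp h)
    subst this
    simp [PySem.Chars.replace.go]
  | succ n ih =>
    intro l acc h
    cases l with
    | nil => simp [PySem.Chars.replace.go]
    | cons c t =>
      simp only [PySem.Chars.replace.go, List.isPrefixOf]
      by_cases hc : a = c
      · subst hc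
        simp only [beq_self_eq_true, Bool.true_and, if_true]
        rw [ih _ _ (by simpa using h)]
        simp
      · rw [if_neg (by simp [hc])]
        rw [ih _ _ (by simpa using h)]
        simp [Ne.symm hc]

theorem replace_single (a b : Char) (l : List Char) :
    PySem.Chars.replace l [a] [b] = l.map (fun c => if c = a then b else c) := by
  rw [PySem.Chars.replace]
  simp only [List.isEmpty_cons, Bool.false_eq_true, if_false]
  rw [replace_go_single a b l.length l [] le_rfl]
  simp

theorem mapping_eq (c : Char) :
    trackMapping.getD c c =
      (fun x => if x = 'v' then '|' else x)
      ((fun x => if x = '^' then '|' else x)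
      ((fun x => if x = '<' then '-' else x)
      (if c = '>' then '-' else c))) := by
  by_cases h1 : c = '>'
  · subst h1; decide
  by_cases h2 : c = '<'
  · subst h2; decide
  by_cases h3 : c = '^'
  · subst h3; decide
  by_cases h4 : c = 'v'
  · subst h4; decide
  · simp [trackMapping, PySem.Dict.getD, Ne.symm h1, Ne.symm h2, Ne.symm h3, Ne.symm h4, h1, h2, h3, h4, PySem.Dict.get?]

-- ===== VERDICT (by name: the statement is the Claim_ definition above) =====
theorem recover_tracks_spec : Claim_equal_recover_tracks := by
  intro data _
  unfold Spec_recover_tracks recover_tracks recover_tracks_alt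
  simp only [PySem.Str.replace, PySem.Str.splitlines, String.toList_ofList]
  rw [show (">" : String).toList = ['>'] from rfl, show ("-" : String).toList = ['-'] from rfl,
      show ("<" : String).toList = ['<'] from rfl, show ("^" : String).toList = ['^'] from rfl,
      show ("|" : String).toList = ['|'] from rfl, show ("v" : String).toList = ['v'] from rfl]
  rw [replace_single, replace_single, replace_single, replace_single]
  simp only [List.map_map]
  refine congrArg _ (congrArg _ (List.map_congr_left ?_))
  intro c _
  exact (mapping_eq c).symm
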